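-- pv_equiv track=rewrite | github.com/pavle-potparic/python_exercises | DictAndSet/kvalifikacije1/nzd.py | pronadji_parove
-- ===== SOURCE A (Python) =====
-- def pronadji_cinioce(broj):
--     cinioci = []
--     for i in range(1, broj + 1):
--         if broj % i == 0:
--             cinioci.append(i)
--
--     return cinioci
--
-- def pronadji_parove(broj):
--     cinioci = pronadji_cinioce(broj)
--     parovi = []
--
--     for i in cinioci:
--         for j in cinioci:
--             if i * j == broj:
--                 if i <= j:
--                     parovi.append((i, j))
--
--     return parovi
-- ===== SOURCE B (Python) =====
-- def pronadji_parove(broj):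
--     parovi = []
--     i = 1
--     while i * i <= broj:
--         if broj % i == 0:
--             parovi.append((i, broj // i))
--         i += 1
--     return parovi
-- ===== Notes on version B (the rewrite author's own statement) =====
-- stated objective: faster
-- what changed: Replaces the full divisor enumeration plus the quadratic all-pairs scan with a single loop over i up to sqrt(broj) that emits (i, broj//i) whenever i divides broj.
import Mathlib
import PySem

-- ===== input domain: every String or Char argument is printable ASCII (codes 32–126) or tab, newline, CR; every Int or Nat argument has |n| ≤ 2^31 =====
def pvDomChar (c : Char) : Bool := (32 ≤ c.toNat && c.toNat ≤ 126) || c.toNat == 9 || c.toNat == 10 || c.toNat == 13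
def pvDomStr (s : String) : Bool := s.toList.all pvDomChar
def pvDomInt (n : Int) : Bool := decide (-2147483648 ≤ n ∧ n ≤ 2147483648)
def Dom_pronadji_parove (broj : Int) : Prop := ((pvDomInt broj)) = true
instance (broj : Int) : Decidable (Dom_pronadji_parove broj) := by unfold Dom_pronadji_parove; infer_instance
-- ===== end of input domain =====

-- B replaces A's full divisor enumeration plus quadratic all-pairs scan by a single
-- loop over i up to sqrt(broj) emitting (i, broj//i); objective: faster (asymptotic).

-- ===== PORT A =====
def pronadji_cinioce (broj : Int) : List Int :=
  (PySem.List.pyRange 1 (broj + 1) 1).foldl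
    (fun cinioci i => if PySem.Int.mod broj i = 0 then cinioci ++ [i] else cinioci) []

def pronadji_parove (broj : Int) : List (Int × Int) :=
  let cinioci := pronadji_cinioce broj
  cinioci.foldl
    (fun parovi i =>
      cinioci.foldl
        (fun parovi j =>
          if i * j = broj then
            if i ≤ j then parovi ++ [(i, j)] else parovi
          else parovi)
        parovi)
    []

-- ===== PORT B =====
-- needed by the port's decreasing_by, hence above it
theorem pvLe_mul_self (i : Int) : i ≤ i * i := by nlinarith [mul_self_nonneg (i - 1)]
theorem pvDec (broj i : Int) (h : i * i ≤ broj) :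
    (broj + 1 - (i + 1)).toNat < (broj + 1 - i).toNat := by
  have := pvLe_mul_self i
  omega

def pronadji_parove_altLoop (broj : Int) (i : Int) (parovi : List (Int × Int)) :
    List (Int × Int) :=
  if _h : i * i ≤ broj then
    pronadji_parove_altLoop broj (i + 1)
      (if PySem.Int.mod broj i = 0 then parovi ++ [(i, PySem.Int.floordiv broj i)] else parovi)
  else parovi
termination_by (broj + 1 - i).toNat
decreasing_by exact pvDec broj i _h

def pronadji_parove_alt (broj : Int) : List (Int × Int) :=
  pronadji_parove_altLoop broj 1 []

-- ===== PRECONDITION & SPEC =====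
def Spec_pronadji_parove (broj : Int) (out : List (Int × Int)) : Prop := out = pronadji_parove_alt broj
instance (broj : Int) (out : List (Int × Int)) : Decidable (Spec_pronadji_parove broj out) := by unfold Spec_pronadji_parove; infer_instance

-- ===== CLAIM (what is proved, stated in full; the proofs are below) =====
def Claim_equal_pronadji_parove : Prop := ∀ (broj : Int), Dom_pronadji_parove broj → Spec_pronadji_parove broj (pronadji_parove broj)

-- ===== LEMMAS AND PROOFS =====

-- the common normal form both ports are reduced to
def pvSpecList (broj : Int) : List (Int × Int) :=
  ((PySem.List.pyRange 1 (broj + 1) 1).filter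
      (fun j => decide (PySem.Int.mod broj j = 0) && decide (j * j ≤ broj))).map
    (fun j => (j, PySem.Int.floordiv broj j))

theorem pvFilter_eq_singleton_of_unique {α : Type} (p : α → Bool) (a : α) :
    ∀ (l : List α), l.Nodup → a ∈ l → p a = true → (∀ x ∈ l, p x = true → x = a) →
      l.filter p = [a] := by
  intro l
  induction l with
  | nil => intro _ ha; cases ha
  | cons b t ih =>
    intro hnd hmem hpa huniq
    rcases List.nodup_cons.mp hnd with ⟨hbt, hndt⟩
    by_cases hpb : p b = true
    · have hba : b = a := huniq b (List.mem_cons_self) hpb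
      subst hba
      have hfilt : t.filter p = [] := by
        rw [List.filter_eq_nil_iff]
        intro x hx hpx
        exact hbt (huniq x (List.mem_cons_of_mem _ hx) hpx ▸ hx)
      simp [hpb, hfilt]
    · have hat : a ∈ t := by
        rcases List.mem_cons.mp hmem with h | h
        · exact absurd (h ▸ hpa) hpb
        · exact h
      rw [List.filter_cons_of_neg (by simp [hpb])]
      exact ih hndt hat hpa (fun x hx => huniq x (List.mem_cons_of_mem _ hx))

theorem pvFlatMap_ite {α β : Type} (p : α → Prop) [DecidablePred p] (f : α → β) :
    ∀ (l : List α),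
      l.flatMap (fun x => if p x then [f x] else []) =
        (l.filter (fun x => decide (p x))).map f := by
  intro l
  induction l with
  | nil => rfl
  | cons b t ih =>
    by_cases hb : p b <;> simp [hb, ih]

-- characterisation of A's divisor list
theorem pvCinioce_eq (broj : Int) :
    pronadji_cinioce broj =
      (PySem.List.pyRange 1 (broj + 1) 1).filter (fun i => decide (PySem.Int.mod broj i = 0)) := by
  unfold pronadji_cinioce
  rw [PySem.List.foldl_append_ite_eq_filter]
  simp

theorem pvMem_cinioce {broj i : Int} (h : i ∈ pronadji_cinioce broj) :
    1 ≤ i ∧ i ≤ broj ∧ i ∣ broj := by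
  rw [pvCinioce_eq, List.mem_filter] at h
  rcases h with ⟨hr, hd⟩
  rw [PySem.List.mem_pyRange_one] at hr
  refine ⟨hr.1, by omega, ?_⟩
  exact (PySem.Int.mod_eq_zero_iff_dvd broj i).mp (by simpa using hd)

theorem pvDiv_mul {broj i : Int} (h1 : 1 ≤ i) (hd : i ∣ broj) :
    i * PySem.Int.floordiv broj i = broj := by
  rw [PySem.Int.floordiv_eq_ediv_of_pos (by omega)]
  rw [mul_comm]
  exact Int.ediv_mul_cancel hd

-- A's inner loop over the divisor list contributes at most the pair (i, broj // i)
theorem pvInner_eq (broj : Int) (i : Int) (hi : i ∈ pronadji_cinioce broj)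
    (parovi : List (Int × Int)) :
    (pronadji_cinioce broj).foldl
        (fun parovi j =>
          if i * j = broj then
            if i ≤ j then parovi ++ [(i, j)] else parovi
          else parovi)
        parovi =
      parovi ++ (if i * i ≤ broj then [(i, PySem.Int.floordiv broj i)] else []) := by
  have hbody :
      (pronadji_cinioce broj).foldl
          (fun parovi j =>
            if i * j = broj then
              if i ≤ j then parovi ++ [(i, j)] else parovi
            else parovi) parovi =
        (pronadji_cinioce broj).foldl
          (fun parovi j =>
            if i * j = broj ∧ i ≤ j then parovi ++ [(i, j)] else parovi) parovi := by
    apply PySem.List.foldl_congr_mem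
    intro acc x _
    by_cases h1 : i * x = broj <;> by_cases h2 : i ≤ x <;> simp [h1, h2]
  rw [hbody, PySem.List.foldl_append_ite]
  congr 1
  obtain ⟨hi1, hile, hidvd⟩ := pvMem_cinioce hi
  set d := PySem.Int.floordiv broj i with hd
  have hmul : i * d = broj := pvDiv_mul hi1 hidvd
  have hd1 : 1 ≤ d := by nlinarith
  have hdle : d ≤ broj := by nlinarith
  have huniq : ∀ x, i * x = broj → x = d := by
    intro x hx
    have : i * x = i * d := by omega
    exact mul_left_cancel₀ (by omega) this
  by_cases hsq : i * i ≤ broj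
  · have hid : i ≤ d := by nlinarith
    have hdmem : d ∈ pronadji_cinioce broj := by
      rw [pvCinioce_eq, List.mem_filter, PySem.List.mem_pyRange_one]
      refine ⟨⟨hd1, by omega⟩, ?_⟩
      simp [PySem.Int.mod_eq_zero_iff_dvd]
      exact ⟨i, by rw [mul_comm] at hmul; omega⟩
    rw [if_pos hsq]
    have hnd : (pronadji_cinioce broj).Nodup := by
      rw [pvCinioce_eq]
      exact (PySem.List.nodup_pyRange_one 1 (broj + 1)).filter _
    rw [pvFilter_eq_singleton_of_unique _ d _ hnd hdmem (by simp [hmul, hid])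
        (fun x _ hx => by
          simp only [decide_eq_true_eq] at hx
          exact huniq x hx.1)]
    simp
  · have hfilt : (pronadji_cinioce broj).filter (fun x => decide (i * x = broj ∧ i ≤ x)) = [] := by
      rw [List.filter_eq_nil_iff]
      intro x _ hx
      simp only [decide_eq_true_eq] at hx
      have := huniq x hx.1
      subst this
      nlinarith [hx.2]
    rw [if_neg hsq, hfilt]
    simp

theorem pvA_eq (broj : Int) : pronadji_parove broj = pvSpecList broj := by
  unfold pronadji_parove
  have h1 :
      (pronadji_cinioce broj).foldl
          (fun parovi i =>
            (pronadji_cinioce broj).foldl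
              (fun parovi j =>
                if i * j = broj then
                  if i ≤ j then parovi ++ [(i, j)] else parovi
                else parovi)
              parovi)
          [] =
        (pronadji_cinioce broj).foldl
          (fun parovi i =>
            parovi ++ (if i * i ≤ broj then [(i, PySem.Int.floordiv broj i)] else []))
          [] :=
    PySem.List.foldl_congr_mem _ _ _ _ (fun acc i hi => pvInner_eq broj i hi acc)
  rw [h1, PySem.List.foldl_append_eq_flatMap]
  rw [pvFlatMap_ite (fun i => i * i ≤ broj) (fun i => (i, PySem.Int.floordiv broj i))]
  rw [pvCinioce_eq, List.filter_filter]
  unfold pvSpecList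
  simp only [List.nil_append]
  congr 1
  apply List.filter_congr
  intro x _
  rw [Bool.and_comm]

-- B's loop computes the tail of the normal form
theorem pvAltLoop_eq (broj : Int) :
    ∀ (n : Nat) (i : Int) (parovi : List (Int × Int)), (broj + 1 - i).toNat ≤ n → 1 ≤ i →
      pronadji_parove_altLoop broj i parovi =
        parovi ++
          ((PySem.List.pyRange i (broj + 1) 1).filter
              (fun j => decide (PySem.Int.mod broj j = 0) && decide (j * j ≤ broj))).map
            (fun j => (j, PySem.Int.floordiv broj j)) := by
  intro n
  induction n with
  | zero =>
    intro i parovi hn hi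
    have hib : broj < i := by omega
    have hsq : ¬ i * i ≤ broj := by nlinarith
    rw [pronadji_parove_altLoop, dif_neg hsq,
        PySem.List.pyRange_one_eq_nil (by omega)]
    simp
  | succ n ih =>
    intro i parovi hn hi
    by_cases hsq : i * i ≤ broj
    · have hib : i ≤ broj := le_trans (pvLe_mul_self i) hsq
      rw [pronadji_parove_altLoop, dif_pos hsq,
          PySem.List.pyRange_one_cons (by omega : i < broj + 1)]
      rw [List.filter_cons]
      by_cases hm : PySem.Int.mod broj i = 0
      · rw [ih (i + 1) _ (by omega) (by omega)]
        simp [hm, hsq]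
      · rw [ih (i + 1) _ (by omega) (by omega)]
        simp [hm]
    · rw [pronadji_parove_altLoop, dif_neg hsq]
      have hfilt :
          (PySem.List.pyRange i (broj + 1) 1).filter
              (fun j => decide (PySem.Int.mod broj j = 0) && decide (j * j ≤ broj)) = [] := by
        rw [List.filter_eq_nil_iff]
        intro x hx hpx
        rw [PySem.List.mem_pyRange_one] at hx
        simp only [decide_eq_true_eq, Bool.and_eq_true] at hpx
        nlinarith [hpx.2, hx.1]
      rw [hfilt]
      simp

theorem pvB_eq (broj : Int) : pronadji_parove_alt broj = pvSpecList broj := by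
  unfold pronadji_parove_alt pvSpecList
  rw [pvAltLoop_eq broj (broj + 1 - 1).toNat 1 [] (le_refl _) (le_refl _)]
  simp

-- ===== VERDICT (by name: the statement is the Claim_ definition above) =====
theorem pronadji_parove_spec : Claim_equal_pronadji_parove := by
  intro broj _
  unfold Spec_pronadji_parove
  rw [pvA_eq, pvB_eq]
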